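-- pv_equiv track=rewrite | github.com/Probe-Particle/ppafm | tests/mesh_refine.py | build_edge_map_with_opposites
-- ===== SOURCE A (Python) =====
-- def build_edge_map_with_opposites(triangles):
--     """Return mapping edge -> (opp1, opp2).
--
--     For each undirected edge (i,j) present in exactly two adjacent triangles
--     (i,j,k) and (j,i,l), store the *opposite* vertices k and l.  If an edge is
--     on the boundary (only one triangle), the second opposite vertex is None.
--     """
--     edge_map = {}
--     for tidx, (i, j, k) in enumerate(triangles):
--         edges = [(i, j, k), (j, k, i), (k, i, j)]
--         for a, b, opp in edges:
--             key = tuple(sorted((a, b)))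
--             if key in edge_map:
--                 edge_map[key].append(opp)
--             else:
--                 edge_map[key] = [opp]
--     # convert lists to length-2 tuples, pad with None if boundary
--     for key, lst in edge_map.items():
--         if len(lst) == 1:
--             lst.append(None)
--         edge_map[key] = tuple(lst[:2])
--     return edge_map
-- ===== SOURCE B (Python) =====
-- def build_edge_map_with_opposites(triangles):
--     """Staged variant: flatten all (edge-key, opposite) pairs first, then for
--     each first-occurrence key gather its first two opposites from the flat
--     list, instead of A's growable per-edge lists plus a finalization pass."""
--     pairs = []
--     for i, j, k in triangles:
--         pairs += [((i, j) if i <= j else (j, i), k),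
--                   ((j, k) if j <= k else (k, j), i),
--                   ((k, i) if k <= i else (i, k), j)]
--     out = {}
--     for key, _ in pairs:
--         if key not in out:
--             opps = [opp for k2, opp in pairs if k2 == key][:2]
--             out[key] = (opps[0], opps[1]) if len(opps) > 1 else (opps[0], None)
--     return out
-- ===== Notes on version B (the rewrite author's own statement) =====
-- stated objective: alternative
-- what changed: B first flattens all (edge-key, opposite) pairs into one list, then builds the result by iterating that list and, at each first-occurrence key, gathering its first two opposites from the flat list by a filtered scan, instead of A's single pass growing per-edge lists in a dict followed by a pad-and-truncate finalization loop.
import Mathlib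
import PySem

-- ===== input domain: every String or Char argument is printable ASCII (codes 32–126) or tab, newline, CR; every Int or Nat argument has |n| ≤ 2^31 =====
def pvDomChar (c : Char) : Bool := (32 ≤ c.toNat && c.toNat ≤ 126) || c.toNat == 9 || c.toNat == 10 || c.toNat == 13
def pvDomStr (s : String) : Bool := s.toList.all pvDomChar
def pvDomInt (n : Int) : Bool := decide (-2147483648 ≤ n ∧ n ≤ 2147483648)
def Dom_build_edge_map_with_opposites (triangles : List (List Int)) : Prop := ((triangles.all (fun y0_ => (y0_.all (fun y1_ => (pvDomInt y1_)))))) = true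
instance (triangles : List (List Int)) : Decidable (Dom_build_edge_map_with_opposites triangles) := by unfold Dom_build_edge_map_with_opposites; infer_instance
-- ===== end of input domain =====

-- B replaces A's one-pass dict of growable per-edge lists (plus a pad-and-truncate
-- finalization loop) by a staged computation: flatten all (edge-key, opposite) pairs
-- into one list, then gather each first-occurrence key's first two opposites from it.

-- ===== PORT A =====
-- tuple(sorted((a, b)))
def pvKeyA (a b : Int) : List Int := PySem.List.sorted [a, b] (fun x => x)

-- one iteration of A's inner loop: 'if key in edge_map: append else singleton'
def pvAEdge (em : PySem.Dict (List Int) (List (Option Int))) (e : Int × Int × Int) :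
    PySem.Dict (List Int) (List (Option Int)) :=
  match em.get? (pvKeyA e.1 e.2.1) with
  | some lst => em.insert (pvKeyA e.1 e.2.1) (lst ++ [some e.2.2])
  | none => em.insert (pvKeyA e.1 e.2.1) [some e.2.2]

-- one iteration of A's outer loop (the unpacking 'i, j, k = triangle'; Python raises
-- ValueError on a triangle without exactly 3 vertices — excluded by Pre_)
def pvATri (em : PySem.Dict (List Int) (List (Option Int))) (t : List Int) :
    PySem.Dict (List Int) (List (Option Int)) :=
  match t with
  | [i, j, k] => [(i, j, k), (j, k, i), (k, i, j)].foldl pvAEdge em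
  | _ => em

-- A's finalization of one value: pad with None if length 1, then tuple(lst[:2]).
-- (exact here: the dict's value lists are never empty, so lst[:2] has 2 entries after padding)
def pvFinal (l : List (Option Int)) : Option Int × Option Int :=
  let l2 := if l.length == 1 then l ++ [none] else l
  (l2.getD 0 none, l2.getD 1 none)

def build_edge_map_with_opposites (triangles : List (List Int)) :
    List (List Int × Option Int × Option Int) :=
  ((triangles.foldl pvATri PySem.Dict.empty).items).map (fun p => (p.1, pvFinal p.2))

-- ===== PORT B =====
-- (a, b) if a <= b else (b, a)
def pvKeyB (a b : Int) : List Int := if a ≤ b then [a, b] else [b, a]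

-- the three (edge-key, opposite) pairs one triangle contributes (empty on a triangle
-- Python could not unpack — excluded by Pre_)
def pvTriPairs (t : List Int) : List (List Int × Int) :=
  match t with
  | [i, j, k] => [(pvKeyB i j, k), (pvKeyB j k, i), (pvKeyB k i, j)]
  | _ => []

-- first loop of B: 'pairs += [...]'
def pvPairsB (triangles : List (List Int)) : List (List Int × Int) :=
  triangles.foldl (fun acc t => acc ++ pvTriPairs t) []

-- '[opp for k2, opp in pairs if k2 == key][:2]'
def pvOppsOf (ps : List (List Int × Int)) (k : List Int) : List Int :=
  ((ps.filter (fun p => p.1 == k)).map (fun p => p.2)).take 2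

-- '(opps[0], opps[1]) if len(opps) > 1 else (opps[0], None)' (opps is never empty:
-- its key was drawn from pairs; the [] case is Python's unreachable IndexError)
def pvMkPair (opps : List Int) : Option Int × Option Int :=
  match opps with
  | o1 :: o2 :: _ => (some o1, some o2)
  | [o1] => (some o1, none)
  | [] => (none, none)

def build_edge_map_with_opposites_alt (triangles : List (List Int)) :
    List (List Int × Option Int × Option Int) :=
  (let ps := pvPairsB triangles
   ps.foldl
     (fun out p =>
       if out.contains p.1 then out
       else out.insert p.1 (pvMkPair (pvOppsOf ps p.1)))
     PySem.Dict.empty).items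

-- ===== PRECONDITION & SPEC =====
-- Python A raises ValueError unpacking any triangle that is not a length-3 list.
def Pre_build_edge_map_with_opposites (triangles : List (List Int)) : Prop :=
  ∀ t ∈ triangles, t.length = 3
instance (triangles : List (List Int)) : Decidable (Pre_build_edge_map_with_opposites triangles) := by unfold Pre_build_edge_map_with_opposites; infer_instance

def pvWitness_build_edge_map_with_opposites : List (List Int) := [[0, 1, 2], [1, 0, 3]]

def Spec_build_edge_map_with_opposites (triangles : List (List Int)) (out : List (List Int × Option Int × Option Int)) : Prop := out = build_edge_map_with_opposites_alt triangles
instance (triangles : List (List Int)) (out : List (List Int × Option Int × Option Int)) : Decidable (Spec_build_edge_map_with_opposites triangles out) := by unfold Spec_build_edge_map_with_opposites; infer_instance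

-- ===== CLAIM (what is proved, stated in full; the proofs are below) =====
def Claim_equal_build_edge_map_with_opposites : Prop := ∀ (triangles : List (List Int)), Dom_build_edge_map_with_opposites triangles → Pre_build_edge_map_with_opposites triangles → Spec_build_edge_map_with_opposites triangles (build_edge_map_with_opposites triangles)

-- ===== LEMMAS AND PROOFS =====

-- A's inner step, viewed on a flat (key, opposite) pair
def pvStep1 (em : PySem.Dict (List Int) (List (Option Int))) (p : List Int × Int) :
    PySem.Dict (List Int) (List (Option Int)) :=
  match em.get? p.1 with
  | some lst => em.insert p.1 (lst ++ [some p.2])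
  | none => em.insert p.1 [some p.2]

-- all opposites a pair list carries for a key, in order
def pvOppsAll (ps : List (List Int × Int)) (k : List Int) : List Int :=
  (ps.filter (fun p => p.1 == k)).map (fun p => p.2)

-- keys of ps not in seen, in first-occurrence order
def pvNewKeys (seen : List (List Int)) : List (List Int × Int) → List (List Int)
  | [] => []
  | p :: qs =>
      if p.1 ∈ seen then pvNewKeys seen qs
      else p.1 :: pvNewKeys (seen ++ [p.1]) qs

theorem pvKey_eq (a b : Int) : pvKeyA a b = pvKeyB a b := by
  by_cases h : a ≤ b <;> simp [pvKeyA, pvKeyB, PySem.List.sorted, PySem.List.insertBy, h]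

theorem pvNewKeys_nodup_disjoint (qs : List (List Int × Int)) (seen : List (List Int)) :
    (pvNewKeys seen qs).Nodup ∧ ∀ x ∈ pvNewKeys seen qs, x ∉ seen := by
  induction qs generalizing seen with
  | nil => simp [pvNewKeys]
  | cons p qs ih =>
    by_cases h : p.1 ∈ seen
    · simp only [pvNewKeys, if_pos h]; exact ih seen
    · obtain ⟨hnd, hdis⟩ := ih (seen ++ [p.1])
      simp only [pvNewKeys, if_neg h]
      refine ⟨List.nodup_cons.2 ⟨fun hm => ?_, hnd⟩, ?_⟩
      · exact hdis _ hm (by simp)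
      · intro x hx
        rcases List.mem_cons.1 hx with rfl | hx
        · exact h
        · intro hxs; exact hdis x hx (by simp [hxs])

-- A characterization: folding pvStep1 appends each opposite to its key's list,
-- creating new keys at the end in first-occurrence order
theorem pvFoldA (qs : List (List Int × Int)) (d : PySem.Dict (List Int) (List (Option Int)))
    (hnd : d.keys.Nodup) :
    (qs.foldl pvStep1 d).items =
      d.items.map (fun e => (e.1, e.2 ++ (pvOppsAll qs e.1).map some)) ++
        (pvNewKeys d.keys qs).map (fun k => (k, (pvOppsAll qs k).map some)) := by
  induction qs generalizing d with
  | nil => simp [pvNewKeys, pvOppsAll]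
  | cons p qs ih =>
    simp only [List.foldl_cons]
    by_cases hc : d.contains p.1 = true
    · -- key already present: append to its list
      have hmem : p.1 ∈ d.keys := (PySem.Dict.contains_iff_mem_keys d p.1).1 hc
      obtain ⟨l, hg⟩ : ∃ l, d.get? p.1 = some l := by
        cases hgc : d.get? p.1 with
        | none => exact absurd ((PySem.Dict.get?_eq_none_iff_contains d p.1).1 hgc) (by simp [hc])
        | some l => exact ⟨l, rfl⟩
      have hstep : pvStep1 d p = d.insert p.1 (l ++ [some p.2]) := by
        simp [pvStep1, hg]
      have hkeys : (d.insert p.1 (l ++ [some p.2])).keys = d.keys :=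
        PySem.Dict.keys_insert_of_contains d _ hc
      rw [hstep, ih _ (by rw [hkeys]; exact hnd)]
      rw [PySem.Dict.items_insert_of_contains d _ hc, hkeys]
      congr 1
      · -- updated items part
        rw [List.map_map]
        apply List.map_congr_left
        intro e he
        by_cases hk : (e.1 == p.1) = true
        · have hk' : e.1 = p.1 := by simpa using hk
          have hthis : d.get? e.1 = some e.2 := by
            obtain ⟨e1, e2⟩ := e
            exact PySem.Dict.get?_of_mem_items d he hnd
          rw [hk'] at hthis
          have hl : e.2 = l := by rw [hthis] at hg; exact Option.some.inj hg
          simp [pvOppsAll, hk', hl]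
        · have hk' : ¬ (e.1 = p.1) := by simpa using hk
          simp [pvOppsAll, beq_iff_eq, hk', Ne.symm hk']
      · -- new keys part
        simp only [pvNewKeys, if_pos hmem]
        apply List.map_congr_left
        intro k hk
        have hk' : k ∉ d.keys := (pvNewKeys_nodup_disjoint qs d.keys).2 k hk
        have hne : ¬ (k = p.1) := fun h => hk' (h ▸ hmem)
        simp [pvOppsAll, beq_iff_eq, Ne.symm hne]
    · -- new key: create singleton, append at the end
      have hcf : d.contains p.1 = false := by simpa using hc
      have hnm : p.1 ∉ d.keys := fun h => hc ((PySem.Dict.contains_iff_mem_keys d p.1).2 h)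
      have hg : d.get? p.1 = none := (PySem.Dict.get?_eq_none_iff_contains d p.1).2 hcf
      have hstep : pvStep1 d p = d.insert p.1 [some p.2] := by simp [pvStep1, hg]
      have hkeys : (d.insert p.1 [some p.2]).keys = d.keys ++ [p.1] :=
        PySem.Dict.keys_insert_of_not_contains d _ hcf
      have hnd' : (d.insert p.1 [some p.2]).keys.Nodup := by
        rw [hkeys]; simpa [List.nodup_append] using ⟨hnd, fun a ha h => hnm (h ▸ ha)⟩
      rw [hstep, ih _ hnd', PySem.Dict.items_insert_of_not_contains d _ hcf, hkeys]
      simp only [List.map_append, List.map_cons, List.map_nil, pvNewKeys, if_neg hnm,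
        List.append_assoc]
      congr 1
      · -- old items: keys differ from p.1
        apply List.map_congr_left
        intro e he
        have hek : e.1 ∈ d.keys := by
          simp only [PySem.Dict.keys]; exact List.mem_map_of_mem he
        have hne : ¬ (e.1 = p.1) := fun h => hnm (h ▸ hek)
        simp [pvOppsAll, beq_iff_eq, Ne.symm hne]
      · rw [List.singleton_append]
        refine List.cons_eq_cons.mpr ⟨?_, ?_⟩
        · -- the freshly created entry
          simp [pvOppsAll]
        · -- later new keys differ from p.1
          apply List.map_congr_left
          intro k hk
          have hk' : k ∉ d.keys ++ [p.1] := (pvNewKeys_nodup_disjoint qs _).2 k hk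
          have hne : ¬ (k = p.1) := fun h => hk' (by simp [h])
          simp [pvOppsAll, beq_iff_eq, Ne.symm hne]

-- B characterization: the contains-guarded fold adds exactly the first-occurrence keys
theorem pvFoldB (ps : List (List Int × Int)) (qs : List (List Int × Int))
    (d : PySem.Dict (List Int) (Option Int × Option Int)) :
    (qs.foldl
        (fun out p =>
          if out.contains p.1 then out
          else out.insert p.1 (pvMkPair (pvOppsOf ps p.1))) d).items =
      d.items ++ (pvNewKeys d.keys qs).map (fun k => (k, pvMkPair (pvOppsOf ps k))) := by
  induction qs generalizing d with
  | nil => simp [pvNewKeys]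
  | cons p qs ih =>
    simp only [List.foldl_cons]
    by_cases hc : d.contains p.1 = true
    · have hmem : p.1 ∈ d.keys := (PySem.Dict.contains_iff_mem_keys d p.1).1 hc
      rw [if_pos hc, ih d]
      simp [pvNewKeys, if_pos hmem]
    · have hcf : d.contains p.1 = false := by simpa using hc
      have hnm : p.1 ∉ d.keys := fun h => hc ((PySem.Dict.contains_iff_mem_keys d p.1).2 h)
      rw [if_neg (by simp [hcf]), ih _]
      rw [PySem.Dict.items_insert_of_not_contains d _ hcf,
        PySem.Dict.keys_insert_of_not_contains d _ hcf]
      simp [pvNewKeys, if_neg hnm]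

-- A's triangle fold is pvStep1 folded over the flattened pair list
theorem pvATri_eq (d : PySem.Dict (List Int) (List (Option Int))) (t : List Int) :
    pvATri d t = (pvTriPairs t).foldl pvStep1 d := by
  match t with
  | [] | [_] | [_, _] | _ :: _ :: _ :: _ :: _ => rfl
  | [i, j, k] =>
    simp [pvATri, pvTriPairs, pvAEdge, pvStep1, List.foldl, pvKey_eq]

theorem pvFoldTris (triangles : List (List Int))
    (d : PySem.Dict (List Int) (List (Option Int))) :
    triangles.foldl pvATri d = (triangles.flatMap pvTriPairs).foldl pvStep1 d := by
  induction triangles generalizing d with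
  | nil => rfl
  | cons t ts ih =>
    simp only [List.foldl_cons, List.flatMap_cons, List.foldl_append]
    rw [pvATri_eq, ih]

-- the two per-key values coincide: A's pad-and-truncate of all opposites is B's
-- pairing of the first two
theorem pvFinal_eq_mkPair (l : List Int) :
    pvFinal (l.map some) = pvMkPair (l.take 2) := by
  match l with
  | [] => rfl
  | [x] => rfl
  | x :: y :: r => simp [pvFinal, pvMkPair]

-- ===== VERDICT (by name: the statement is the Claim_ definition above) =====
theorem build_edge_map_with_opposites_spec : Claim_equal_build_edge_map_with_opposites := by
  intro triangles _ _
  unfold Spec_build_edge_map_with_opposites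
  unfold build_edge_map_with_opposites build_edge_map_with_opposites_alt
  have hps : pvPairsB triangles = triangles.flatMap pvTriPairs := by
    unfold pvPairsB
    rw [PySem.List.foldl_append_eq_flatMap]
    simp
  rw [pvFoldTris, pvFoldB (pvPairsB triangles) (pvPairsB triangles) PySem.Dict.empty, hps,
    pvFoldA _ PySem.Dict.empty (by simp [PySem.Dict.keys_empty])]
  simp only [PySem.Dict.empty, PySem.Dict.keys]
  simp only [List.map_nil, List.nil_append, List.map_map]
  apply List.map_congr_left
  intro k _
  have : pvOppsOf (triangles.flatMap pvTriPairs) k = (pvOppsAll (triangles.flatMap pvTriPairs) k).take 2 := rfl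
  simp [Function.comp, this, pvFinal_eq_mkPair]
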